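-- pv_equiv track=rewrite | github.com/amchavan/alma-datapro-workflow-sandbox | workflow-db-mock/dashboard/server.py | doPipelineReports
-- ===== SOURCE A (Python) =====
-- def compareByTimestamp( record ):
-- 	return record['timestamp']
--
-- def doPipelineReports( pipelineReports ):
-- 	pipelineReports = sorted( pipelineReports, key=compareByTimestamp, reverse=True )
--
-- 	table = []
-- 	row = 0
-- 	for pipelineReport in pipelineReports:
-- 		table.append( [None] * 2 )
-- 		table[row][0] = pipelineReport['ousUID']
-- 		table[row][1] = pipelineReport['timestamp']
-- 		row += 1
--
-- 	html = renderPipelineReportsTable( table, len( pipelineReports ), 2 )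
-- 	return html
--
-- def renderPipelineReportsTable( table, rows, cols ):
-- 	html = '<tr><th>OUS UID</th><th>Timestamp</th>\n'
-- 	if rows > 0:
-- 		for row in range(0, rows):
-- 			ousUID    = table[row][0]
-- 			timestamp = table[row][1]
-- 			timestamp = timestamp.replace( 'T', '&nbsp;' )
-- 			html 	  += "<tr><td>%s</td><td>%s</td></tr>\n" % (ousUID,timestamp)
-- 	return html
-- ===== SOURCE B (Python) =====
-- def doPipelineReports(pipelineReports):
--     # Maintain the reports in descending-timestamp order incrementally:
--     # insert each report after all already-placed reports with timestamp >= its own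
--     # (this keeps equal timestamps in original order, like a stable reverse sort).
--     ordered = []
--     for report in pipelineReports:
--         ts = report['timestamp']
--         i = 0
--         while i < len(ordered) and ordered[i]['timestamp'] >= ts:
--             i += 1
--         ordered.insert(i, report)
--     rows = ''.join(
--         "<tr><td>%s</td><td>%s</td></tr>\n" % (r['ousUID'], r['timestamp'].replace('T', '&nbsp;'))
--         for r in ordered)
--     return '<tr><th>OUS UID</th><th>Timestamp</th>\n' + rows
-- ===== Notes on version B (the rewrite author's own statement) =====
-- stated objective: alternative
-- what changed: B replaces A's library sort plus staged 2-D table and index-driven rendering helper by a hand-rolled stable insertion into a descending-ordered list, then renders by joining per-report row strings; no intermediate table, row counter or helper call.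
import Mathlib
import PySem

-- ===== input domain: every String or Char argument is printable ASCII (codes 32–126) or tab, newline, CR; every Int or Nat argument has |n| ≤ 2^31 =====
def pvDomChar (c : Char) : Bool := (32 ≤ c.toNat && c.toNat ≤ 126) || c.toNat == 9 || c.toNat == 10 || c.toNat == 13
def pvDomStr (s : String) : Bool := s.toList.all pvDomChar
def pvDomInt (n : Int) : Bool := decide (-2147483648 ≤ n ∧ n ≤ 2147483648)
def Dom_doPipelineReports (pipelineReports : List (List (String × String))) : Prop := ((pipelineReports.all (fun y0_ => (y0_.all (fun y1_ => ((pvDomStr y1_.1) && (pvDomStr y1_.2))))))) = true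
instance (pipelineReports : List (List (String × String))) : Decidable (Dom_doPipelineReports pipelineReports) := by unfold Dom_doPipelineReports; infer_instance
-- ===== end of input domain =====

-- B replaces A's library sort + staged 2-D table + index-driven rendering helper by a
-- hand-rolled stable insertion into a descending-ordered list and a join of row strings
-- (objective: alternative).

-- ===== PORT A =====
-- record['timestamp'] / record['ousUID']: Pre_ guarantees the key is present, so .getD "" never fires.
def compareByTimestamp (record : List (String × String)) : String :=
  (record.lookup "timestamp").getD ""

def renderPipelineReportsTable (table : List (String × String)) (rows : Int) (_cols : Int) : String :=
  let html := "<tr><th>OUS UID</th><th>Timestamp</th>\n"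
  if rows > 0 then
    (PySem.List.pyRange 0 rows 1).foldl (fun html row =>
      let ousUID := (PySem.List.pyGetD table row ("", "")).1
      let timestamp := (PySem.List.pyGetD table row ("", "")).2
      let timestamp := PySem.Str.replace timestamp "T" "&nbsp;"
      html ++ "<tr><td>" ++ ousUID ++ "</td><td>" ++ timestamp ++ "</td></tr>\n") html
  else html

-- the loop body: table.append([None]*2); table[row][0] = …; table[row][1] = …; row += 1
-- (a two-slot row is a pair; the [None]*2 placeholder is ("",""), overwritten before any read)
def doPipelineReports (pipelineReports : List (List (String × String))) : String :=
  let sortedReports := PySem.List.sorted pipelineReports compareByTimestamp true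
  let st := sortedReports.foldl
    (fun (st : List (String × String) × Nat) pipelineReport =>
      let table := st.1 ++ [("", "")]
      let table := table.set st.2
        ((pipelineReport.lookup "ousUID").getD "",
         (PySem.List.pyGetD table (st.2 : Int) ("", "")).2)
      let table := table.set st.2
        ((PySem.List.pyGetD table (st.2 : Int) ("", "")).1,
         (pipelineReport.lookup "timestamp").getD "")
      (table, st.2 + 1))
    ([], 0)
  renderPipelineReportsTable st.1 (sortedReports.length : Int) 2

-- ===== PORT B =====
-- B's index-scan 'while i < len(ordered) and ordered[i]["timestamp"] >= ts: i += 1;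
-- ordered.insert(i, report)' ported as the equivalent structural recursion (exact).
def insertReport (report : List (String × String)) :
    List (List (String × String)) → List (List (String × String))
  | [] => [report]
  | h :: t =>
    if (report.lookup "timestamp").getD "" ≤ (h.lookup "timestamp").getD "" then
      h :: insertReport report t
    else
      report :: h :: t

def rowHtml (report : List (String × String)) : String :=
  "<tr><td>" ++ (report.lookup "ousUID").getD "" ++ "</td><td>" ++
    PySem.Str.replace ((report.lookup "timestamp").getD "") "T" "&nbsp;" ++ "</td></tr>\n"

def doPipelineReports_alt (pipelineReports : List (List (String × String))) : String :=
  let ordered := pipelineReports.foldl (fun acc report => insertReport report acc) []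
  "<tr><th>OUS UID</th><th>Timestamp</th>\n" ++ PySem.Str.join "" (ordered.map rowHtml)

-- ===== PRECONDITION & SPEC =====
-- A raises KeyError when a record lacks 'timestamp' (sort key) or 'ousUID'; exactly those inputs are excluded.
def Pre_doPipelineReports (pipelineReports : List (List (String × String))) : Prop :=
  ∀ r ∈ pipelineReports,
    (r.lookup "timestamp").isSome ∧ (r.lookup "ousUID").isSome

instance (pipelineReports : List (List (String × String))) : Decidable (Pre_doPipelineReports pipelineReports) := by
  unfold Pre_doPipelineReports; infer_instance

def pvWitness_doPipelineReports : (List (List (String × String))) :=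
  [[("ousUID", "uid://A1"), ("timestamp", "2020-01-02T03:04:05")],
   [("ousUID", "uid://A2"), ("timestamp", "2021-01-02T03:04:05")]]

def Spec_doPipelineReports (pipelineReports : List (List (String × String))) (out : String) : Prop := out = doPipelineReports_alt pipelineReports
instance (pipelineReports : List (List (String × String))) (out : String) : Decidable (Spec_doPipelineReports pipelineReports out) := by unfold Spec_doPipelineReports; infer_instance

-- ===== CLAIM (what is proved, stated in full; the proofs are below) =====
def Claim_equal_doPipelineReports : Prop := ∀ (pipelineReports : List (List (String × String))), Dom_doPipelineReports pipelineReports → Pre_doPipelineReports pipelineReports → Spec_doPipelineReports pipelineReports (doPipelineReports pipelineReports)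

-- ===== LEMMAS AND PROOFS =====

-- the row a sorted report contributes to A's table
def rowOf (r : List (String × String)) : String × String :=
  ((r.lookup "ousUID").getD "", (r.lookup "timestamp").getD "")

-- A's build loop is: table grows by rowOf r each step, row counter = table length
lemma build_inv (l : List (List (String × String))) (t : List (String × String)) :
    l.foldl
      (fun (st : List (String × String) × Nat) pipelineReport =>
        let table := st.1 ++ [("", "")]
        let table := table.set st.2
          ((pipelineReport.lookup "ousUID").getD "",
           (PySem.List.pyGetD table (st.2 : Int) ("", "")).2)
        let table := table.set st.2
          ((PySem.List.pyGetD table (st.2 : Int) ("", "")).1,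
           (pipelineReport.lookup "timestamp").getD "")
        (table, st.2 + 1))
      (t, t.length)
    = (t ++ l.map rowOf, t.length + l.length) := by
  induction l generalizing t with
  | nil => simp
  | cons r l ih =>
    have hstep :
        ((t ++ [("", "")]).set t.length
            ((r.lookup "ousUID").getD "",
             (PySem.List.pyGetD (t ++ [(("" : String), ("" : String))]) (t.length : Int) ("", "")).2))
          = t ++ [((r.lookup "ousUID").getD "", "")] := by
      rw [PySem.List.pyGetD_natCast]
      simp [List.set_append_right]
    simp only [List.foldl_cons]
    rw [hstep]
    have hget : (PySem.List.pyGetD (t ++ [(((r.lookup "ousUID").getD "" : String), ("" : String))]) (t.length : Int) ("", "")).1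
        = (r.lookup "ousUID").getD "" := by
      rw [PySem.List.pyGetD_natCast]
      simp
    rw [hget]
    have hset2 : (t ++ [(((r.lookup "ousUID").getD "" : String), ("" : String))]).set t.length
        ((r.lookup "ousUID").getD "", (r.lookup "timestamp").getD "")
        = t ++ [rowOf r] := by
      simp [List.set_append_right, rowOf]
    rw [hset2]
    have := ih (t ++ [rowOf r])
    simp only [List.length_append, List.length_cons, List.length_nil] at this ⊢
    rw [this]
    simp [List.append_assoc]
    omega

-- rendering A's table = one string-accumulating pass over the sorted reports
lemma render_eq (l : List (List (String × String))) :
    renderPipelineReportsTable (l.map rowOf) (l.length : Int) 2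
      = l.foldl (fun html report => html ++ rowHtml report)
          "<tr><th>OUS UID</th><th>Timestamp</th>\n" := by
  unfold renderPipelineReportsTable
  by_cases h : (l.length : Int) > 0
  · simp only [h, if_pos]
    have hb : (l.length : Int) = ((l.map rowOf).length : Int) := by simp
    rw [hb, PySem.List.foldl_pyRange_pyGetD' (l.map rowOf) ("", "")
      (fun acc p => acc ++ "<tr><td>" ++ p.1 ++ "</td><td>" ++
        PySem.Str.replace p.2 "T" "&nbsp;" ++ "</td></tr>\n") _ le_rfl]
    simp only [Int.toNat_zero, List.drop_zero, List.foldl_map]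
    congr 1
    funext acc r
    simp only [rowOf, rowHtml]
    simp [String.append_assoc]
  · have hl : l = [] := by
      have : l.length = 0 := by omega
      exact List.length_eq_zero_iff.mp this
    subst hl
    simp

-- B's structural insertion is PySem's insertBy for the descending comparison
lemma insertReport_eq_insertBy (r : List (String × String)) (l : List (List (String × String))) :
    insertReport r l
      = PySem.List.insertBy
          (fun a b => decide (compareByTimestamp b < compareByTimestamp a)) r l := by
  induction l with
  | nil => rfl
  | cons h t ih =>
    simp only [compareByTimestamp] at ih ⊢
    simp only [insertReport, PySem.List.insertBy]
    by_cases hle : (r.lookup "timestamp").getD "" ≤ (h.lookup "timestamp").getD ""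
    · rw [if_pos hle, if_neg (by simpa using not_lt.mpr hle), ih]
    · rw [if_neg hle, if_pos (by simpa using lt_of_not_ge hle)]

-- B's incremental insertion builds exactly Python's stable reverse sort
lemma foldl_insertReport_eq_sorted (ps : List (List (String × String))) :
    ps.foldl (fun acc report => insertReport report acc) []
      = PySem.List.sorted ps compareByTimestamp true := by
  rw [PySem.List.sorted_rev_eq_foldl_insertBy]
  exact PySem.List.foldl_congr_mem _ _ _ _ (fun acc x _ => insertReport_eq_insertBy x acc)

-- accumulating rows = prefix ++ join of the individual row strings
lemma foldl_rows_eq_join (l : List (List (String × String))) (acc : String) :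
    l.foldl (fun html report => html ++ rowHtml report) acc
      = acc ++ PySem.Str.join "" (l.map rowHtml) := by
  induction l generalizing acc with
  | nil => simp [PySem.Str.join]
  | cons r t ih =>
    simp only [List.foldl_cons, List.map_cons, ih]
    cases t with
    | nil => simp [PySem.Str.join]
    | cons s u =>
      simp [PySem.Str.join, PySem.Chars.join_cons_cons, String.ofList_append,
        String.append_assoc]

-- ===== VERDICT (by name: the statement is the Claim_ definition above) =====
theorem doPipelineReports_spec : Claim_equal_doPipelineReports := by
  intro ps _hdom _hpre
  unfold Spec_doPipelineReports doPipelineReports doPipelineReports_alt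
  have hb := build_inv (PySem.List.sorted ps compareByTimestamp true) []
  simp only [List.length_nil, List.nil_append, Nat.zero_add] at hb
  simp only [hb]
  rw [render_eq, foldl_insertReport_eq_sorted, foldl_rows_eq_join]
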